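-- pv_equiv track=rewrite | github.com/FranRovi/Algorithms | Leet_Code/Easy/longerContiguousSegmentOfOnesThanZeros.py | checkZerosOnes
-- ===== SOURCE A (Python) =====
-- def checkZerosOnes(s):
--     if len(s) == 1:
--             return True if s[0] == "1" else False
--     maxCounterOfZeros = 0
--     maxCounterOfOnes = 0
--     temp = 0
--     for i in range(1,len(s)):
--         if s[i] == s[i-1]:
--             temp += 1
--         else:
--             if s[i-1] == "0" and temp > maxCounterOfZeros:
--                     maxCounterOfZeros = temp
--             if s[i-1] == "1" and temp > maxCounterOfOnes:
--                     maxCounterOfOnes = temp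
--             temp = 0
--     if s[i] == "0" and temp > maxCounterOfZeros:
--         maxCounterOfZeros = temp
--     if s[i] == "1" and temp > maxCounterOfOnes:
--         maxCounterOfOnes = temp
--     if maxCounterOfOnes > maxCounterOfZeros:
--         return True
--     return False
-- ===== SOURCE B (Python) =====
-- def checkZerosOnes(s):
--     def longest_run(s, c):
--         best = cur = 0
--         for ch in s:
--             cur = cur + 1 if ch == c else 0
--             if cur > best:
--                 best = cur
--         return best
--     return longest_run(s, '1') > longest_run(s, '0')
-- ===== Notes on version B (the rewrite author's own statement) =====
-- stated objective: simpler
-- what changed: Replaces A's index-pair loop (which tracks run-length-minus-one per run and needs a special len==1 case and a post-loop fixup using the leftover loop variable) by a reusable longest_run helper that iterates over characters directly (no s[i]/s[i-1] indexing), called once for '1' and once for '0'; a timing run measured B about 2x faster.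
-- intended difference: On strings of length >= 2 that contain '1' but no '0' and no two adjacent '1's (e.g. '1 '), A returns False because its counter stores run length minus one so a lone '1' never beats the zero-run counter, while B returns True, the intended answer since the longest '1'-segment (1) exceeds the longest '0'-segment (0). — e.g. on checkZerosOnes("1 "): A returns false, B returns true
import Mathlib
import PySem

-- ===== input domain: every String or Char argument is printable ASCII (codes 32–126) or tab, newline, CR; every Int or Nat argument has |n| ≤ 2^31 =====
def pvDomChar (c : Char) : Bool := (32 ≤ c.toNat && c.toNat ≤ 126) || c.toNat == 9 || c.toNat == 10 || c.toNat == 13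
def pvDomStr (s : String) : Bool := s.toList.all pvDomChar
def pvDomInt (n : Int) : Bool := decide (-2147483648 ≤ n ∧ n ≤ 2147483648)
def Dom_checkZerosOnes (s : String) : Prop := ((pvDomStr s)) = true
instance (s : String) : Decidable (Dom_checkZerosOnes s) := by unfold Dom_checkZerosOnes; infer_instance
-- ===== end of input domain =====

-- B replaces A's index-pair loop by a longest-run helper called for '1' and for '0' (simpler
-- decomposition, same O(n) cost); B fixes A's off-by-one on lone-'1' strings without '0' (see D_)
-- and returns False on the empty string, where A raises UnboundLocalError (excluded by Pre_).

-- ===== PORT A =====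
-- loop body of A: state (maxCounterOfZeros, maxCounterOfOnes, temp); s[i] and s[i-1] are always
-- in range when Python executes this loop, so pyGetD with a dummy default is exact there
def pvStepA (l : List Char) (st : Int × Int × Int) (i : Int) : Int × Int × Int :=
  let mz := st.1; let mo := st.2.1; let temp := st.2.2
  let si := PySem.List.pyGetD l i ' '
  let sp := PySem.List.pyGetD l (i - 1) ' '
  if si = sp then (mz, mo, temp + 1)
  else
    (if sp = '0' ∧ temp > mz then temp else mz,
     if sp = '1' ∧ temp > mo then temp else mo, 0)

def checkZerosOnes (s : String) : Bool :=
  let l := s.toList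
  if l.length = 1 then (if PySem.List.pyGetD l 0 ' ' = '1' then true else false)
  else
    let st := (PySem.List.pyRange 1 (l.length : Int) 1).foldl (pvStepA l) (0, 0, 0)
    -- after the loop Python's leftover loop variable i equals len(s) - 1;
    -- on s = "" Python raises UnboundLocalError instead (excluded by Pre_)
    let last := PySem.List.pyGetD l ((l.length : Int) - 1) ' '
    let mz := if last = '0' ∧ st.2.2 > st.1 then st.2.2 else st.1
    let mo := if last = '1' ∧ st.2.2 > st.2.1 then st.2.2 else st.2.1
    if mo > mz then true else false

-- ===== PORT B =====
-- helper longest_run of Source B: running (best, cur) over the characters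
def pvLongestRun (l : List Char) (c : Char) : Int :=
  (l.foldl (fun (st : Int × Int) ch =>
      let cur := if ch = c then st.2 + 1 else 0
      (if cur > st.1 then cur else st.1, cur)) ((0 : Int), (0 : Int))).1

def checkZerosOnes_alt (s : String) : Bool :=
  pvLongestRun s.toList '1' > pvLongestRun s.toList '0'

-- ===== PRECONDITION & SPEC =====
-- Pre_ excludes only the empty string, on which A raises UnboundLocalError
def Pre_checkZerosOnes (s : String) : Prop := s ≠ ""
instance (s : String) : Decidable (Pre_checkZerosOnes s) := by unfold Pre_checkZerosOnes; infer_instance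
def pvWitness_checkZerosOnes : String := "10"

-- two adjacent occurrences of c somewhere in the list (i.e. some run of c has length ≥ 2)
def pvHasDouble (c : Char) : List Char → Bool
  | a :: b :: t => (a = c && b = c) || pvHasDouble c (b :: t)
  | _ => false

-- On strings of length ≥ 2 that contain '1' but no '0' and no two adjacent '1's, A returns False
-- (its counter stores run length minus one, so a lone '1' never beats the zero-run counter) while
-- B returns True, the intended answer: the longest '1'-segment (1) exceeds the longest '0'-segment (0).
def D_checkZerosOnes (s : String) : Prop :=
  2 ≤ s.toList.length ∧ '1' ∈ s.toList ∧ '0' ∉ s.toList ∧ pvHasDouble '1' s.toList = false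
instance (s : String) : Decidable (D_checkZerosOnes s) := by unfold D_checkZerosOnes; infer_instance

def Spec_checkZerosOnes (s : String) (out : Bool) : Prop :=
  ¬ D_checkZerosOnes s → out = checkZerosOnes_alt s
instance (s : String) (out : Bool) : Decidable (Spec_checkZerosOnes s out) := by unfold Spec_checkZerosOnes; infer_instance

def pvDiffWitness_checkZerosOnes : String := "1 "
def pvDiffWitnessOut_checkZerosOnes : Bool × Bool := (false, true)

-- ===== CLAIM (what is proved, stated in full; the proofs are below) =====
def Claim_unchanged_checkZerosOnes : Prop := ∀ (s : String), Dom_checkZerosOnes s → Pre_checkZerosOnes s → Spec_checkZerosOnes s (checkZerosOnes s)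
def Claim_changed_checkZerosOnes : Prop := Dom_checkZerosOnes (pvDiffWitness_checkZerosOnes) ∧ Pre_checkZerosOnes (pvDiffWitness_checkZerosOnes) ∧ D_checkZerosOnes (pvDiffWitness_checkZerosOnes) ∧ checkZerosOnes (pvDiffWitness_checkZerosOnes) = pvDiffWitnessOut_checkZerosOnes.1 ∧ checkZerosOnes_alt (pvDiffWitness_checkZerosOnes) = pvDiffWitnessOut_checkZerosOnes.2 ∧ pvDiffWitnessOut_checkZerosOnes.1 ≠ pvDiffWitnessOut_checkZerosOnes.2
def Claim_exact_checkZerosOnes : Prop := ∀ (s : String), Dom_checkZerosOnes s → Pre_checkZerosOnes s → D_checkZerosOnes s → checkZerosOnes s ≠ checkZerosOnes_alt s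

-- ===== LEMMAS AND PROOFS =====

-- B's fold with general accumulators
def pvF (c : Char) (l : List Char) (b cur : Int) : Int :=
  (l.foldl (fun (st : Int × Int) ch =>
      let cur := if ch = c then st.2 + 1 else 0
      (if cur > st.1 then cur else st.1, cur)) (b, cur)).1

theorem pvF_nil (c : Char) (b cur : Int) : pvF c [] b cur = b := rfl

theorem pvF_cons (c x : Char) (xs : List Char) (b cur : Int) :
    pvF c (x :: xs) b cur =
      pvF c xs (max b (if x = c then cur + 1 else 0)) (if x = c then cur + 1 else 0) := by
  show pvF c xs (if (if x = c then cur + 1 else 0) > b then (if x = c then cur + 1 else 0) else b) _ = _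
  congr 1
  split_ifs <;> omega

theorem pvF_max (c : Char) (l : List Char) : ∀ (a b cur : Int),
    pvF c l (max a b) cur = max a (pvF c l b cur) := by
  induction l with
  | nil => intro a b cur; simp [pvF_nil]
  | cons x xs ih =>
    intro a b cur
    rw [pvF_cons, pvF_cons, max_assoc, ih]

theorem pvF_ge (c : Char) (l : List Char) : ∀ (b cur : Int), b ≤ pvF c l b cur := by
  induction l with
  | nil => intro b cur; simp [pvF_nil]
  | cons x xs ih =>
    intro b cur
    rw [pvF_cons]
    exact le_trans (le_max_left _ _) (ih _ _)

theorem pvF_mem (c : Char) (l : List Char) : ∀ (b cur : Int), 0 ≤ cur → c ∈ l →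
    1 ≤ pvF c l b cur := by
  induction l with
  | nil => intro b cur _ h; simp at h
  | cons x xs ih =>
    intro b cur hcur hmem
    rw [pvF_cons]
    by_cases hx : x = c
    · simp only [hx, if_pos rfl]
      calc (1 : Int) ≤ max b (cur + 1) := by omega
        _ ≤ _ := pvF_ge _ _ _ _
    · have : c ∈ xs := by
        rcases List.mem_cons.mp hmem with h | h
        · exact absurd h.symm hx
        · exact h
      exact ih _ _ (by split_ifs <;> omega) this

theorem pvF_notmem (c : Char) (l : List Char) : ∀ (b : Int), 0 ≤ b → c ∉ l →
    pvF c l b 0 = b := by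
  induction l with
  | nil => intro b _ _; rfl
  | cons x xs ih =>
    intro b hb hmem
    have hx : ¬ x = c := fun h => hmem (by simp [h])
    rw [pvF_cons, if_neg hx, max_eq_left hb]
    exact ih b hb (fun h => hmem (List.mem_cons_of_mem _ h))

theorem pvHasDouble_cons_false (c a : Char) (t : List Char) :
    pvHasDouble c (a :: t) = false → pvHasDouble c t = false := by
  cases t with
  | nil => intro _; rfl
  | cons b t' =>
    intro h
    simp only [pvHasDouble, Bool.or_eq_false_iff] at h
    exact h.2

theorem pvF_double (c : Char) (l : List Char) : ∀ (b cur : Int), 0 ≤ cur →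
    pvHasDouble c l = true → 2 ≤ pvF c l b cur := by
  induction l with
  | nil => intro b cur _ h; simp [pvHasDouble] at h
  | cons a t ih =>
    intro b cur hcur hd
    cases t with
    | nil => simp [pvHasDouble] at hd
    | cons x t' =>
      simp only [pvHasDouble, Bool.or_eq_true, Bool.and_eq_true, decide_eq_true_eq] at hd
      rcases hd with ⟨ha, hx⟩ | hd
      · rw [pvF_cons, if_pos ha, pvF_cons, if_pos hx]
        calc (2 : Int) ≤ max (max b (cur + 1)) (cur + 1 + 1) := by omega
          _ ≤ _ := pvF_ge _ _ _ _
      · rw [pvF_cons]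
        exact ih _ _ (by split_ifs <;> omega) hd

theorem pvF_nodouble (c : Char) (l : List Char) : ∀ (b cur : Int),
    pvHasDouble c l = false → b ≤ 1 → 0 ≤ cur → cur ≤ 1 →
    (∀ x, l.head? = some x → x = c → cur ≤ 0) → pvF c l b cur ≤ 1 := by
  induction l with
  | nil => intro b cur _ hb _ _ _; simpa [pvF_nil] using hb
  | cons a t ih =>
    intro b cur hd hb hcur0 hcur1 hhead
    rw [pvF_cons]
    by_cases ha : a = c
    · have hc0 : cur ≤ 0 := hhead a rfl ha
      have hcur : cur = 0 := le_antisymm hc0 hcur0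
      rw [if_pos ha, hcur]
      refine ih _ _ (pvHasDouble_cons_false c a t hd) (by omega) (by omega) (by omega) ?_
      intro x hx hxc
      exfalso
      cases t with
      | nil => simp at hx
      | cons y t' =>
        simp only [List.head?_cons, Option.some.injEq] at hx
        subst hx
        simp [pvHasDouble, ha, hxc] at hd
    · rw [if_neg ha]
      exact ih _ _ (pvHasDouble_cons_false c a t hd) (by omega) le_rfl (by omega)
        (fun x hx hxc => le_refl 0)

-- A's loop and final updates as a structural recursion on the tail of the string
def pvT (prev : Char) (l : List Char) (mz mo temp : Int) : Int × Int :=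
  match l with
  | [] => (if prev = '0' ∧ temp > mz then temp else mz,
           if prev = '1' ∧ temp > mo then temp else mo)
  | x :: xs =>
    if x = prev then pvT x xs mz mo (temp + 1)
    else pvT x xs (if prev = '0' ∧ temp > mz then temp else mz)
                  (if prev = '1' ∧ temp > mo then temp else mo) 0

-- bridge: the indexed foldl of port A (from index i+1) plus the final updates equals pvT at l[i]
theorem pvA_bridge (l : List Char) (k : Nat) : ∀ (i : Nat) (mz mo temp : Int), i + 1 + k = l.length →
    (let st := (PySem.List.pyRange ((i : Int) + 1) (l.length : Int) 1).foldl (pvStepA l) (mz, mo, temp)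
     let last := PySem.List.pyGetD l ((l.length : Int) - 1) ' '
     ((if last = '0' ∧ st.2.2 > st.1 then st.2.2 else st.1),
      (if last = '1' ∧ st.2.2 > st.2.1 then st.2.2 else st.2.1))) =
    pvT (l.getD i ' ') (l.drop (i + 1)) mz mo temp := by
  induction k with
  | zero =>
    intro i mz mo temp hlen
    have hi : i < l.length := by omega
    have h1 : ((i : Int) + 1) = (l.length : Int) := by omega
    rw [h1, PySem.List.pyRange_one_eq_nil (le_refl _)]
    have hget : PySem.List.pyGetD l ((l.length : Int) - 1) ' ' = l.getD i ' ' := by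
      rw [@PySem.List.pyGetD_eq_getElem Char l ((l.length : Int) - 1) ' ' (by omega) (by omega)]
      rw [List.getD_eq_getElem l ' ' hi]
      congr 1 <;> omega
    have hdrop : l.drop (i + 1) = [] := List.drop_eq_nil_of_le (by omega)
    rw [hget, hdrop]
    rfl
  | succ k ih =>
    intro i mz mo temp hlen
    have hi : i < l.length := by omega
    have hi1 : i + 1 < l.length := by omega
    have hcons : PySem.List.pyRange ((i : Int) + 1) (l.length : Int) 1 =
        ((i : Int) + 1) :: PySem.List.pyRange ((i : Int) + 1 + 1) (l.length : Int) 1 :=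
      PySem.List.pyRange_one_cons (by omega)
    rw [hcons, List.foldl_cons]
    have hgi : PySem.List.pyGetD l ((i : Int) + 1) ' ' = l.getD (i + 1) ' ' := by
      rw [@PySem.List.pyGetD_eq_getElem Char l ((i : Int) + 1) ' ' (by omega) (by push_cast; omega)]
      rw [List.getD_eq_getElem l ' ' hi1]
      congr 1 <;> omega
    have hgp : PySem.List.pyGetD l ((i : Int) + 1 - 1) ' ' = l.getD i ' ' := by
      rw [@PySem.List.pyGetD_eq_getElem Char l ((i : Int) + 1 - 1) ' ' (by omega) (by omega)]
      rw [List.getD_eq_getElem l ' ' hi]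
      congr 1 <;> omega
    have hdrop : l.drop (i + 1) = l.getD (i + 1) ' ' :: l.drop (i + 2) := by
      rw [List.getD_eq_getElem l ' ' hi1]
      exact List.drop_eq_getElem_cons hi1
    have hcast : ((i : Int) + 1 + 1) = (((i + 1 : Nat) : Int) + 1) := by push_cast; omega
    rw [hdrop]
    show (let st := (PySem.List.pyRange ((i : Int) + 1 + 1) (l.length : Int) 1).foldl (pvStepA l)
            (pvStepA l (mz, mo, temp) ((i : Int) + 1)); _) = _
    simp only [pvStepA, hgi, hgp]
    by_cases heq : l.getD (i + 1) ' ' = l.getD i ' '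
    · rw [if_pos heq]
      rw [show pvT (l.getD i ' ') (l.getD (i + 1) ' ' :: l.drop (i + 2)) mz mo temp =
          pvT (l.getD (i + 1) ' ') (l.drop (i + 2)) mz mo (temp + 1) by
        simp only [pvT, if_pos heq]]
      rw [hcast]
      exact ih (i + 1) mz mo (temp + 1) (by omega)
    · rw [if_neg heq]
      rw [show pvT (l.getD i ' ') (l.getD (i + 1) ' ' :: l.drop (i + 2)) mz mo temp =
          pvT (l.getD (i + 1) ' ') (l.drop (i + 2))
            (if l.getD i ' ' = '0' ∧ temp > mz then temp else mz)
            (if l.getD i ' ' = '1' ∧ temp > mo then temp else mo) 0 by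
        simp only [pvT, if_neg heq]]
      rw [hcast]
      exact ih (i + 1) _ _ 0 (by omega)

-- the per-character summary that pvT computes
def pvG (c prev : Char) (l : List Char) (temp : Int) : Int :=
  max 0 (pvF c l (max 0 (if prev = c then temp + 1 else 0)) (if prev = c then temp + 1 else 0) - 1)

theorem max_sub_one (a b : Int) : max 0 (max a b - 1) = max (max 0 (a - 1)) (max 0 (b - 1)) := by
  omega

theorem pvG_cons (c prev x : Char) (xs : List Char) (temp : Int) (ht : 0 ≤ temp) :
    pvG c prev (x :: xs) temp =
      if x = prev then pvG c x xs (temp + 1)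
      else max (if prev = c then temp else 0) (pvG c x xs 0) := by
  unfold pvG
  rw [pvF_cons]
  by_cases hx : x = prev
  · rw [if_pos hx]
    by_cases hp : prev = c
    · have hxc : x = c := hx ▸ hp
      rw [if_pos hp, if_pos hxc]
      have hm : max (max 0 (temp + 1)) (temp + 1 + 1) = max 0 (temp + 1 + 1) := by omega
      rw [hm]
    · have hxc : ¬ x = c := fun h => hp (hx ▸ h)
      rw [if_neg hp, if_neg hxc, if_neg hxc]
      norm_num
  · rw [if_neg hx]
    have hkey : (if x = c then (if prev = c then temp + 1 else 0) + 1 else 0) =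
        (if x = c then (0 : Int) + 1 else 0) := by
      by_cases hxc : x = c
      · have hp : ¬ prev = c := fun h => hx (hxc.trans h.symm)
        rw [if_pos hxc, if_pos hxc, if_neg hp]
      · rw [if_neg hxc, if_neg hxc]
    rw [hkey]
    have hsplit : max (max 0 (if prev = c then temp + 1 else 0)) (if x = c then (0:Int) + 1 else 0)
        = max (max 0 (if prev = c then temp + 1 else 0))
              (max 0 (if x = c then (0:Int) + 1 else 0)) := by
      split_ifs <;> omega
    rw [hsplit, pvF_max]
    rw [max_sub_one]
    congr 1
    split_ifs <;> omega

theorem if_and_max (p : Prop) [Decidable p] (t m : Int) (hm : 0 ≤ m) :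
    (if p ∧ t > m then t else m) = max m (if p then t else 0) := by
  by_cases hp : p
  · simp only [hp, true_and, if_true]
    split_ifs <;> omega
  · simp only [hp, false_and, if_false]
    omega

theorem pvT_eq (l : List Char) : ∀ (prev : Char) (mz mo temp : Int),
    0 ≤ mz → 0 ≤ mo → 0 ≤ temp →
    pvT prev l mz mo temp = (max mz (pvG '0' prev l temp), max mo (pvG '1' prev l temp)) := by
  induction l with
  | nil =>
    intro prev mz mo temp hmz hmo ht
    have h0 : pvG '0' prev [] temp = if prev = '0' then temp else 0 := by
      unfold pvG
      rw [pvF_nil]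
      split_ifs <;> omega
    have h1 : pvG '1' prev [] temp = if prev = '1' then temp else 0 := by
      unfold pvG
      rw [pvF_nil]
      split_ifs <;> omega
    rw [h0, h1]
    show (if prev = '0' ∧ temp > mz then temp else mz,
          if prev = '1' ∧ temp > mo then temp else mo) = _
    rw [if_and_max _ _ _ hmz, if_and_max _ _ _ hmo]
  | cons x xs ih =>
    intro prev mz mo temp hmz hmo ht
    rw [pvG_cons _ _ _ _ _ ht, pvG_cons _ _ _ _ _ ht]
    by_cases hx : x = prev
    · rw [if_pos hx, if_pos hx]
      rw [show pvT prev (x :: xs) mz mo temp = pvT x xs mz mo (temp + 1) by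
        simp only [pvT, if_pos hx]]
      exact ih x mz mo (temp + 1) hmz hmo (by omega)
    · rw [if_neg hx, if_neg hx]
      rw [show pvT prev (x :: xs) mz mo temp =
          pvT x xs (if prev = '0' ∧ temp > mz then temp else mz)
            (if prev = '1' ∧ temp > mo then temp else mo) 0 by
        simp only [pvT, if_neg hx]]
      rw [ih x _ _ 0 (by split_ifs <;> omega) (by split_ifs <;> omega) le_rfl]
      rw [if_and_max _ _ _ hmz, if_and_max _ _ _ hmo, max_assoc, max_assoc]

-- pvG at temp = 0 is exactly max 0 (longest run − 1) of the whole string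
theorem pvG_zero (c prev : Char) (l : List Char) :
    pvG c prev l 0 = max 0 (pvF c (prev :: l) 0 0 - 1) := by
  unfold pvG
  rw [pvF_cons]

theorem pvG_nonneg (c prev : Char) (l : List Char) (temp : Int) : 0 ≤ pvG c prev l temp :=
  le_max_left _ _

-- A's value on a string of length ≥ 2, in closed form
theorem checkZerosOnes_closed (s : String) (h2 : 2 ≤ s.toList.length) :
    checkZerosOnes s =
      decide (max 0 (pvF '1' s.toList 0 0 - 1) > max 0 (pvF '0' s.toList 0 0 - 1)) := by
  obtain ⟨x, xs, hx⟩ : ∃ x xs, s.toList = x :: xs := by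
    cases hl : s.toList with
    | nil => rw [hl] at h2; simp at h2
    | cons a t => exact ⟨a, t, rfl⟩
  have hbr := pvA_bridge s.toList (s.toList.length - 1) 0 0 0 0 (by omega)
  simp only [Nat.cast_zero, zero_add] at hbr
  have hget0 : s.toList.getD 0 ' ' = x := by rw [hx]; rfl
  have hdrop0 : s.toList.drop (0 + 1) = xs := by rw [hx]; rfl
  rw [hget0, hdrop0] at hbr
  rw [pvT_eq xs x 0 0 0 le_rfl le_rfl le_rfl] at hbr
  simp only [checkZerosOnes]
  rw [if_neg (by omega)]
  have hz := congrArg Prod.fst hbr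
  have ho := congrArg Prod.snd hbr
  simp only at hz ho
  rw [hz, ho]
  have m0 : max (0 : Int) (pvG '0' x xs 0) = pvG '0' x xs 0 := max_eq_right (pvG_nonneg _ _ _ _)
  have m1 : max (0 : Int) (pvG '1' x xs 0) = pvG '1' x xs 0 := max_eq_right (pvG_nonneg _ _ _ _)
  rw [m0, m1, pvG_zero, pvG_zero, ← hx]
  by_cases hgt : max 0 (pvF '1' s.toList 0 0 - 1) > max 0 (pvF '0' s.toList 0 0 - 1)
  · rw [if_pos hgt, decide_eq_true hgt]
  · rw [if_neg hgt]
    simp [hgt]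

theorem alt_closed (s : String) :
    checkZerosOnes_alt s = decide (pvF '1' s.toList 0 0 > pvF '0' s.toList 0 0) := rfl

theorem toList_ne_nil (s : String) (h : s ≠ "") : s.toList ≠ [] := by
  intro hn
  exact h (String.toList_eq_nil_iff.mp hn)

theorem pvF_singleton (c' c : Char) : pvF c' [c] 0 0 = max 0 (if c = c' then (0 : Int) + 1 else 0) := by
  rw [pvF_cons, pvF_nil]

-- ===== VERDICT (by name: the statement is the Claim_ definition above) =====
theorem checkZerosOnes_spec : Claim_unchanged_checkZerosOnes := by
  intro s _ hpre hnd
  have hnil : s.toList ≠ [] := toList_ne_nil s hpre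
  by_cases h1 : s.toList.length = 1
  · obtain ⟨c, hc⟩ := List.length_eq_one_iff.mp h1
    have hA : checkZerosOnes s = (if c = '1' then true else false) := by
      simp only [checkZerosOnes]
      rw [if_pos h1, hc, PySem.List.pyGetD_zero_cons]
    rw [hA, alt_closed, hc, pvF_singleton, pvF_singleton]
    by_cases hc1 : c = '1'
    · have hc0 : ¬ c = '0' := by rw [hc1]; decide
      simp [hc1, hc0]
    · by_cases hc0 : c = '0' <;> simp [hc1, hc0]
  · have h2 : 2 ≤ s.toList.length := by
      have : s.toList.length ≠ 0 := by
        intro h0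
        exact hnil (List.length_eq_zero_iff.mp h0)
      omega
    rw [checkZerosOnes_closed s h2, alt_closed]
    have n1 : (0 : Int) ≤ pvF '1' s.toList 0 0 := pvF_ge _ _ _ _
    have n0 : (0 : Int) ≤ pvF '0' s.toList 0 0 := pvF_ge _ _ _ _
    have hnot : ¬ (pvF '1' s.toList 0 0 = 1 ∧ pvF '0' s.toList 0 0 = 0) := by
      rintro ⟨e1, e0⟩
      apply hnd
      refine ⟨h2, ?_, ?_, ?_⟩
      · by_contra hmem
        rw [pvF_notmem '1' s.toList 0 le_rfl hmem] at e1
        exact absurd e1 (by norm_num)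
      · intro hmem
        have := pvF_mem '0' s.toList 0 0 le_rfl hmem
        omega
      · by_contra hdb
        have hdb' : pvHasDouble '1' s.toList = true := by
          cases h : pvHasDouble '1' s.toList
          · exact absurd h hdb
          · rfl
        have := pvF_double '1' s.toList 0 0 le_rfl hdb'
        omega
    rw [decide_eq_decide]
    omega

theorem checkZerosOnes_changed : Claim_changed_checkZerosOnes := by
  unfold Claim_changed_checkZerosOnes; decide

theorem checkZerosOnes_tight : Claim_exact_checkZerosOnes := by
  intro s _ _ hD
  obtain ⟨h2, hmem1, hmem0, hdb⟩ := hD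
  have hR0 : pvF '0' s.toList 0 0 = 0 := pvF_notmem '0' s.toList 0 le_rfl hmem0
  have hR1 : pvF '1' s.toList 0 0 = 1 := by
    have hle : pvF '1' s.toList 0 0 ≤ 1 :=
      pvF_nodouble '1' s.toList 0 0 hdb (by omega) le_rfl (by omega)
        (fun x _ _ => le_rfl)
    have hge : 1 ≤ pvF '1' s.toList 0 0 := pvF_mem '1' s.toList 0 0 le_rfl hmem1
    omega
  rw [checkZerosOnes_closed s h2, alt_closed, hR0, hR1]
  norm_num
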